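-- pv_equiv track=rewrite | github.com/6lr0w0ll38/py | py/9.sum&mul.py | mul_in_base
-- ===== SOURCE A (Python) =====
-- def mul_in_base(a, b, base):
--     la, lb = len(a) - 1, len(b) - 1
--     r = []
--     a = list(reversed(a))
--     b = list(reversed(b))
--     while len(r) < la + lb + 2:
--         r += [0]
--     for _ in range(la + 1):
--         m = s = 0
--         for __ in range(lb + 1):
--             t = a[_] * b[__] + m
--             rt , m = t % base, t // base
--             t = r[_ + __] + rt + s
--             r[_ + __], s = t % base, t // base
--         r[lb + 1 + _] = m + s
--     return r
-- ===== SOURCE B (Python) =====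
-- def mul_in_base(a, b, base):
--     n = len(a) + len(b)
--     if n == 0:
--         return []
--     va = 0
--     for d in a:
--         va = va * base + d
--     vb = 0
--     for d in b:
--         vb = vb * base + d
--     p = va * vb
--     r = []
--     for _ in range(n - 1):
--         p, d = divmod(p, base)
--         r.append(d)
--     r.append(p)
--     return r
-- ===== Notes on version B (the rewrite author's own statement) =====
-- stated objective: faster
-- what changed: Replaces the quadratic digit-by-digit schoolbook multiplication with: convert both digit lists to integers by Horner evaluation, multiply once with native big-int arithmetic, then re-expand the product into n-1 fixed digits by repeated divmod plus a final carry digit.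
-- outside the precondition, e.g. on mul_in_base([], [5, 6], 0): A returns [0, 0], B raises ZeroDivisionError
import Mathlib
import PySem

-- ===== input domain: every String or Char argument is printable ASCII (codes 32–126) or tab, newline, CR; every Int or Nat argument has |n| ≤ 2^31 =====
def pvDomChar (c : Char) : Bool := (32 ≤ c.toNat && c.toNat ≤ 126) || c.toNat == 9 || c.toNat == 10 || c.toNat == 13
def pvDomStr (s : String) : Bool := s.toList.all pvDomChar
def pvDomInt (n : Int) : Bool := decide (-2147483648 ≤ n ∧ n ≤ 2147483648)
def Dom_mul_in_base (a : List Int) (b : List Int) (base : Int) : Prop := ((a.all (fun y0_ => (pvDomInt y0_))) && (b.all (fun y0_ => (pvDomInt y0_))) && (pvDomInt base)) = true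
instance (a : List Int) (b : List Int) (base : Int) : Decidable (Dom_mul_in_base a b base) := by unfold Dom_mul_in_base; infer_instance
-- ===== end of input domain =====

-- B replaces A's quadratic schoolbook digit loops by: Horner-evaluate both digit lists to
-- integers, one big multiplication, then expand the product back to fixed-length digits by
-- repeated divmod (measured faster; big-int arithmetic instead of interpreted digit loops).

-- ===== PORT A =====
-- while len(r) < la + lb + 2: r += [0]
def pvPad (r : List Int) (target : Nat) : List Int :=
  if _h : r.length < target then pvPad (r ++ [0]) target else r
termination_by target - r.length
decreasing_by simp; omega

-- body of the inner 'for __ in range(lb + 1)' loop (k = outer index, j = inner index)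
def pvIStep (base x : Int) (rb : List Int) (k : Nat)
    (st : List Int × Int × Int) (j : Nat) : List Int × Int × Int :=
  let t := x * rb.getD j 0 + st.2.1
  let rt := PySem.Int.mod t base
  let m := PySem.Int.floordiv t base
  let t2 := st.1.getD (k + j) 0 + rt + st.2.2
  (st.1.set (k + j) (PySem.Int.mod t2 base), m, PySem.Int.floordiv t2 base)

-- body of the outer 'for _ in range(la + 1)' loop (r[lb + 1 + _] = m + s at the end)
def pvOStep (base : Int) (ra rb : List Int) (r : List Int) (k : Nat) : List Int :=
  let st := (List.range rb.length).foldl (pvIStep base (ra.getD k 0) rb k) (r, 0, 0)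
  st.1.set (rb.length + k) (st.2.1 + st.2.2)

def mul_in_base (a : List Int) (b : List Int) (base : Int) : List Int :=
  let ra := a.reverse
  let rb := b.reverse
  let r0 := pvPad [] (a.length + b.length)
  (List.range a.length).foldl (pvOStep base ra rb) r0

-- ===== PORT B =====
def mul_in_base_alt (a : List Int) (b : List Int) (base : Int) : List Int :=
  let n := a.length + b.length
  if n = 0 then []
  else
    let va := a.foldl (fun v d => v * base + d) 0
    let vb := b.foldl (fun v d => v * base + d) 0
    let p := va * vb
    let st := (List.range (n - 1)).foldl
      (fun (st : List Int × Int) _ =>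
        (st.1 ++ [PySem.Int.mod st.2 base], PySem.Int.floordiv st.2 base)) (([] : List Int), p)
    st.1 ++ [st.2]

-- ===== PRECONDITION & SPEC =====
-- Pre_ restricts to a nonzero radix (the natural domain of "multiply in a base"): with
-- base = 0, A raises ZeroDivisionError whenever both lists are nonempty, and the zero list
-- A returns when exactly one list is empty is an artefact of its loops never dividing;
-- B's divmod raises there.  (Negative bases ARE included and proved equal.)
def Pre_mul_in_base (a : List Int) (b : List Int) (base : Int) : Prop :=
  base ≠ 0 ∨ (a = [] ∧ b = [])
instance (a : List Int) (b : List Int) (base : Int) : Decidable (Pre_mul_in_base a b base) := by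
  unfold Pre_mul_in_base; infer_instance

def pvWitness_mul_in_base : List Int × List Int × Int := ([1, 2], [3], 10)

def Spec_mul_in_base (a : List Int) (b : List Int) (base : Int) (out : List Int) : Prop := out = mul_in_base_alt a b base
instance (a : List Int) (b : List Int) (base : Int) (out : List Int) : Decidable (Spec_mul_in_base a b base out) := by unfold Spec_mul_in_base; infer_instance

-- ===== CLAIM (what is proved, stated in full; the proofs are below) =====
def Claim_equal_mul_in_base : Prop := ∀ (a : List Int) (b : List Int) (base : Int), Dom_mul_in_base a b base → Pre_mul_in_base a b base → Spec_mul_in_base a b base (mul_in_base a b base)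

-- ===== LEMMAS AND PROOFS =====

-- d lies in Python's remainder range for divisor `base` (sign of the divisor)
def pvGood (base d : Int) : Prop :=
  (0 < base ∧ 0 ≤ d ∧ d < base) ∨ (base < 0 ∧ base < d ∧ d ≤ 0)

theorem pvGood_zero {base : Int} (hb : base ≠ 0) : pvGood base 0 := by
  unfold pvGood; omega

theorem pvGood_mod {base : Int} (hb : base ≠ 0) (t : Int) : pvGood base (PySem.Int.mod t base) := by
  rcases lt_or_gt_of_ne hb with h | h
  · have := PySem.Int.mod_neg_bounds (a := t) h
    exact Or.inr ⟨h, this.1, this.2⟩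
  · exact Or.inl ⟨h, PySem.Int.mod_nonneg (a := t) h, PySem.Int.mod_lt (a := t) h⟩

-- uniqueness of Python divmod: if d is in remainder range then (d + base*v) divmods to (v, d)
theorem pvDivmod_unique {base : Int} (hb : base ≠ 0) (d v : Int) (hd : pvGood base d) :
    PySem.Int.floordiv (d + base * v) base = v ∧ PySem.Int.mod (d + base * v) base = d := by
  have h1 := PySem.Int.floordiv_mul_add_mod (d + base * v) base
  have hm := pvGood_mod hb (d + base * v)
  set q := PySem.Int.floordiv (d + base * v) base with hq
  set m := PySem.Int.mod (d + base * v) base with hmm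
  have key : base * (q - v) = d - m := by ring_nf; ring_nf at h1; linarith
  have hqv : q = v := by
    rcases hd with ⟨hb', hd1, hd2⟩ | ⟨hb', hd1, hd2⟩ <;>
      rcases hm with ⟨hb2, hm1, hm2⟩ | ⟨hb2, hm1, hm2⟩ <;>
      first
        | omega
        | (by_contra hne
           have h' : q - v ≥ 1 ∨ q - v ≤ -1 := by omega
           rcases h' with h' | h' <;> nlinarith)
  refine ⟨hqv, ?_⟩
  rw [hqv] at key
  simp at key
  omega

theorem pvMod_zero {base : Int} (hb : base ≠ 0) : PySem.Int.mod 0 base = 0 := by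
  have := pvDivmod_unique hb 0 0 (pvGood_zero hb)
  simpa using this.2

theorem pvFloordiv_zero {base : Int} (hb : base ≠ 0) : PySem.Int.floordiv 0 base = 0 := by
  have := pvDivmod_unique hb 0 0 (pvGood_zero hb)
  simpa using this.1

-- little-endian value of a digit list
def pvValLE (base : Int) : List Int → Int
  | [] => 0
  | d :: r => d + base * pvValLE base r

theorem pvValLE_append_single (base : Int) (l : List Int) (d : Int) :
    pvValLE base (l ++ [d]) = pvValLE base l + d * base ^ l.length := by
  induction l with
  | nil => simp [pvValLE]
  | cons e l ih => simp [pvValLE, ih]; ring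

theorem pvValLE_replicate (base : Int) (n : Nat) :
    pvValLE base (List.replicate n 0) = 0 := by
  induction n with
  | zero => rfl
  | succ n ih => simp [List.replicate_succ, pvValLE, ih]

theorem getD_replicate_zero (n i : Nat) : (List.replicate n (0 : Int)).getD i 0 = 0 := by
  rcases lt_or_ge i n with h | h
  · simp [List.getD, h]
  · rw [List.getD_eq_default]; simpa using h

theorem getD_set_self (l : List Int) (p : Nat) (v : Int) (h : p < l.length) :
    (l.set p v).getD p 0 = v := by
  simp [List.getD, h]

theorem getD_set_ne (l : List Int) (p i : Nat) (v : Int) (h : i ≠ p) :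
    (l.set p v).getD i 0 = l.getD i 0 := by
  simp [List.getD, List.getElem?_set_ne (Ne.symm h)]

theorem pvValLE_set (base : Int) :
    ∀ (r : List Int) (p : Nat) (v : Int), p < r.length →
      pvValLE base (r.set p v) = pvValLE base r + (v - r.getD p 0) * base ^ p := by
  intro r
  induction r with
  | nil => intro p v h; simp at h
  | cons d r ih =>
    intro p v h
    cases p with
    | zero => simp [pvValLE, List.getD]; ring
    | succ p =>
      simp only [List.set_cons_succ, pvValLE]
      rw [ih p v (by simpa using h)]
      simp [List.getD]
      ring

theorem take_succ_getD (l : List Int) (i : Nat) (h : i < l.length) :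
    l.take (i + 1) = l.take i ++ [l.getD i 0] := by
  rw [List.take_add_one]
  simp [List.getElem?_eq_getElem h, List.getD, Option.toList]

-- Horner evaluation equals little-endian value of the reversal
theorem pvHorner_aux (base : Int) :
    ∀ (l : List Int) (v : Int),
      l.foldl (fun v d => v * base + d) v = v * base ^ l.length + pvValLE base l.reverse := by
  intro l
  induction l with
  | nil => intro v; simp [pvValLE]
  | cons d l ih =>
    intro v
    simp only [List.foldl_cons, List.reverse_cons, List.length_cons]
    rw [ih, pvValLE_append_single]
    simp
    ring

theorem pvHorner_eq (base : Int) (l : List Int) :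
    l.foldl (fun v d => v * base + d) 0 = pvValLE base l.reverse := by
  rw [pvHorner_aux]; ring

-- ===== B-side characterisation: the digit-expansion fold =====
def pvQuot (base p : Int) : Nat → Int
  | 0 => p
  | m + 1 => PySem.Int.floordiv (pvQuot base p m) base

def pvDigs (base p : Int) : Nat → List Int
  | 0 => []
  | m + 1 => pvDigs base p m ++ [PySem.Int.mod (pvQuot base p m) base]

-- canonical n-digit expansion: n-1 remainders then the remaining quotient
def pvCanon (base p : Int) : Nat → List Int
  | 0 => []
  | 1 => [p]
  | n + 2 => PySem.Int.mod p base :: pvCanon base (PySem.Int.floordiv p base) (n + 1)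

theorem pvQuot_succ_front (base p : Int) :
    ∀ m, pvQuot base p (m + 1) = pvQuot base (PySem.Int.floordiv p base) m := by
  intro m
  induction m with
  | zero => rfl
  | succ m ih =>
    show PySem.Int.floordiv (pvQuot base p (m + 1)) base = _
    rw [ih]
    rfl

theorem pvDigs_succ_front (base p : Int) :
    ∀ m, pvDigs base p (m + 1) = PySem.Int.mod p base :: pvDigs base (PySem.Int.floordiv p base) m := by
  intro m
  induction m with
  | zero => rfl
  | succ m ih =>
    show pvDigs base p (m + 1) ++ _ = _
    rw [ih, pvQuot_succ_front]
    simp [pvDigs]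

theorem pvAlt_fold (base : Int) :
    ∀ (m : Nat) (p : Int),
      (List.range m).foldl
        (fun (st : List Int × Int) _ =>
          (st.1 ++ [PySem.Int.mod st.2 base], PySem.Int.floordiv st.2 base)) (([] : List Int), p)
        = (pvDigs base p m, pvQuot base p m) := by
  intro m p
  induction m with
  | zero => rfl
  | succ m ih => rw [List.range_succ, List.foldl_append, ih]; rfl

theorem pvCanon_eq_digs (base : Int) :
    ∀ (m : Nat) (p : Int), pvCanon base p (m + 1) = pvDigs base p m ++ [pvQuot base p m] := by
  intro m
  induction m with
  | zero => intro p; rfl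
  | succ m ih =>
    intro p
    show pvCanon base p (m + 2) = _
    rw [pvCanon, ih, pvDigs_succ_front, pvQuot_succ_front]
    simp

theorem pvAlt_eq_canon (a b : List Int) (base : Int) :
    mul_in_base_alt a b base
      = pvCanon base
          ((a.foldl (fun v d => v * base + d) 0) * (b.foldl (fun v d => v * base + d) 0))
          (a.length + b.length) := by
  unfold mul_in_base_alt
  by_cases h : a.length + b.length = 0
  · simp [h, pvCanon]
  · rcases Nat.exists_eq_succ_of_ne_zero h with ⟨m, hm⟩
    simp only [hm]
    rw [show m + 1 - 1 = m from rfl, pvAlt_fold, pvCanon_eq_digs]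
    simp

theorem pvCanon_zero {base : Int} (hb : base ≠ 0) :
    ∀ m, pvCanon base 0 m = List.replicate m 0 := by
  intro m
  induction m using Nat.twoStepInduction with
  | zero => rfl
  | one => rfl
  | more m _ ih =>
    show pvCanon base 0 (m + 2) = _
    rw [pvCanon, pvMod_zero hb, pvFloordiv_zero hb, ih]
    simp [List.replicate_succ]

-- uniqueness: a list whose non-top digits are in remainder range is the canonical expansion of its value
theorem pvCanon_unique {base : Int} (hb : base ≠ 0) :
    ∀ (r : List Int), r ≠ [] →
      (∀ i, i + 1 < r.length → pvGood base (r.getD i 0)) →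
      r = pvCanon base (pvValLE base r) r.length := by
  intro r
  induction r with
  | nil => intro h; exact absurd rfl h
  | cons d rest ih =>
    intro _ hgood
    cases rest with
    | nil => simp [pvValLE, pvCanon]
    | cons e rest' =>
      have hgd : pvGood base d := hgood 0 (by simp)
      have hdm := pvDivmod_unique hb d (pvValLE base (e :: rest')) hgd
      have : (e :: rest').length + 1 = (e :: rest').length - 1 + 2 := by simp
      show d :: (e :: rest') = pvCanon base (pvValLE base (d :: e :: rest')) ((e :: rest').length + 1)
      rw [this]
      show _ = PySem.Int.mod _ base :: pvCanon base (PySem.Int.floordiv _ base) _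
      have hval : pvValLE base (d :: e :: rest') = d + base * pvValLE base (e :: rest') := rfl
      rw [hval, hdm.1, hdm.2]
      have hres : (e :: rest') = pvCanon base (pvValLE base (e :: rest')) (e :: rest').length := by
        apply ih (by simp)
        intro i hi
        have := hgood (i + 1) (by simpa using hi)
        simpa [List.getD] using this
      rw [show (e :: rest').length - 1 + 1 = (e :: rest').length by simp]
      exact congrArg (List.cons d) hres

-- pvPad builds a zero list
theorem pvPad_eq (t : Nat) :
    ∀ (n : Nat) (r : List Int), t - r.length = n → pvPad r t = r ++ List.replicate n 0 := by
  intro n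
  induction n with
  | zero =>
    intro r h
    unfold pvPad
    rw [dif_neg (by omega)]
    simp
  | succ n ih =>
    intro r h
    unfold pvPad
    rw [dif_pos (by omega)]
    rw [ih (r ++ [0]) (by simp; omega)]
    simp [List.replicate_succ]

theorem pvPad_nil (n : Nat) : pvPad [] n = List.replicate n 0 := by
  simpa using pvPad_eq n n [] (by simp)

-- ===== the inner-loop invariant =====
theorem pvInner_inv (base x : Int) (hb : base ≠ 0) (rb : List Int) (k : Nat) (r0 : List Int)
    (hkl : k + rb.length ≤ r0.length) :
    ∀ j, j ≤ rb.length →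
      (((List.range j).foldl (pvIStep base x rb k) (r0, 0, 0)).1.length = r0.length) ∧
      (pvValLE base ((List.range j).foldl (pvIStep base x rb k) (r0, 0, 0)).1
         + (((List.range j).foldl (pvIStep base x rb k) (r0, 0, 0)).2.1
            + ((List.range j).foldl (pvIStep base x rb k) (r0, 0, 0)).2.2) * base ^ (k + j)
       = pvValLE base r0 + x * pvValLE base (rb.take j) * base ^ k) ∧
      (∀ i, i < k ∨ k + j ≤ i →
        ((List.range j).foldl (pvIStep base x rb k) (r0, 0, 0)).1.getD i 0 = r0.getD i 0) ∧
      (∀ i, k ≤ i → i < k + j →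
        pvGood base (((List.range j).foldl (pvIStep base x rb k) (r0, 0, 0)).1.getD i 0)) := by
  intro j
  induction j with
  | zero =>
    intro _
    refine ⟨rfl, by simp [pvValLE], fun i _ => rfl, fun i h1 h2 => absurd h1 (by omega)⟩
  | succ j ih =>
    intro hj
    have hjlt : j < rb.length := by omega
    obtain ⟨ihL, ihV, ihU, ihG⟩ := ih (by omega)
    set st := (List.range j).foldl (pvIStep base x rb k) (r0, 0, 0) with hst
    have hunf : (List.range (j + 1)).foldl (pvIStep base x rb k) (r0, 0, 0)
        = pvIStep base x rb k st j := by
      rw [List.range_succ, List.foldl_append]; rfl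
    have hkj : k + j < st.1.length := by rw [ihL]; omega
    have I1 := PySem.Int.floordiv_mul_add_mod (x * rb.getD j 0 + st.2.1) base
    have I2 := PySem.Int.floordiv_mul_add_mod
      (st.1.getD (k + j) 0 + PySem.Int.mod (x * rb.getD j 0 + st.2.1) base + st.2.2) base
    refine ⟨?_, ?_, ?_, ?_⟩
    · rw [hunf]; simp only [pvIStep]; simpa using ihL
    · rw [hunf]
      simp only [pvIStep]
      rw [pvValLE_set base st.1 (k + j) _ hkj,
        take_succ_getD rb j hjlt, pvValLE_append_single]
      have hlt : (rb.take j).length = j := by simp [List.length_take]; omega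
      rw [hlt]
      linear_combination ihV + (base ^ (k + j)) * I1 + (base ^ (k + j)) * I2
    · intro i hi
      rw [hunf]
      simp only [pvIStep]
      rw [getD_set_ne _ _ _ _ (by omega)]
      exact ihU i (by omega)
    · intro i h1 h2
      rw [hunf]
      simp only [pvIStep]
      by_cases hik : i = k + j
      · rw [hik, getD_set_self _ _ _ hkj]
        exact pvGood_mod hb _
      · rw [getD_set_ne _ _ _ _ hik]
        exact ihG i h1 (by omega)

-- ===== the outer-loop invariant =====
theorem pvOuter_inv (base : Int) (hb : base ≠ 0) (ra rb : List Int) (hrb : 1 ≤ rb.length)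
    (n : Nat) (hn : n = ra.length + rb.length) :
    ∀ k, k ≤ ra.length →
      (((List.range k).foldl (pvOStep base ra rb) (List.replicate n 0)).length = n) ∧
      (pvValLE base ((List.range k).foldl (pvOStep base ra rb) (List.replicate n 0))
         = pvValLE base (ra.take k) * pvValLE base rb) ∧
      (∀ i, i < n → i + 1 ≠ rb.length + k →
        pvGood base (((List.range k).foldl (pvOStep base ra rb) (List.replicate n 0)).getD i 0)) ∧
      (∀ i, rb.length + k ≤ i →
        ((List.range k).foldl (pvOStep base ra rb) (List.replicate n 0)).getD i 0 = 0) := by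
  intro k
  induction k with
  | zero =>
    intro _
    refine ⟨by simp, by simp [pvValLE_replicate, pvValLE], ?_, ?_⟩
    · intro i _ _
      simp only [List.range_zero, List.foldl_nil]
      rw [getD_replicate_zero]
      exact pvGood_zero hb
    · intro i _
      simp only [List.range_zero, List.foldl_nil]
      rw [getD_replicate_zero]
  | succ k ih =>
    intro hk
    have hklt : k < ra.length := by omega
    obtain ⟨ihL, ihV, ihG, ihZ⟩ := ih (by omega)
    set r := (List.range k).foldl (pvOStep base ra rb) (List.replicate n 0) with hr
    have hunf : (List.range (k + 1)).foldl (pvOStep base ra rb) (List.replicate n 0)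
        = pvOStep base ra rb r k := by
      rw [List.range_succ, List.foldl_append]; rfl
    obtain ⟨iL, iV, iU, iG⟩ :=
      pvInner_inv base (ra.getD k 0) hb rb k r (by omega) rb.length le_rfl
    set st := (List.range rb.length).foldl (pvIStep base (ra.getD k 0) rb k) (r, 0, 0) with hsts
    have htoplt : rb.length + k < n := by omega
    have hstlen : st.1.length = n := by rw [iL, ihL]
    have htop0 : st.1.getD (rb.length + k) 0 = 0 := by
      rw [iU (rb.length + k) (Or.inr (by omega))]
      exact ihZ _ (by omega)
    refine ⟨?_, ?_, ?_, ?_⟩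
    · rw [hunf]; simp only [pvOStep]; simpa using hstlen
    · rw [hunf]
      simp only [pvOStep]
      rw [pvValLE_set base st.1 _ _ (by omega), htop0,
        take_succ_getD ra k hklt, pvValLE_append_single]
      have hfull : rb.take rb.length = rb := by simp
      rw [hfull] at iV
      have hlt : (ra.take k).length = k := by simp [List.length_take]; omega
      rw [hlt]
      have hpow : base ^ (k + rb.length) = base ^ (rb.length + k) := by ring_nf
      rw [hpow] at iV
      linear_combination iV + ihV
    · intro i hi hne
      rw [hunf]
      simp only [pvOStep]
      rw [getD_set_ne _ _ _ _ (by omega)]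
      by_cases h1 : i < k
      · rw [iU i (Or.inl h1)]
        exact ihG i hi (by omega)
      · by_cases h2 : i < k + rb.length
        · exact iG i (by omega) h2
        · rw [iU i (Or.inr (by omega))]
          rw [ihZ i (by omega)]
          exact pvGood_zero hb
    · intro i hi
      rw [hunf]
      simp only [pvOStep]
      rw [getD_set_ne _ _ _ _ (by omega)]
      rw [iU i (Or.inr (by omega))]
      exact ihZ i (by omega)

theorem pvA_main (a b : List Int) (base : Int) (hb : base ≠ 0) (ha : a ≠ []) (hbb : b ≠ []) :
    mul_in_base a b base
      = pvCanon base
          ((a.foldl (fun v d => v * base + d) 0) * (b.foldl (fun v d => v * base + d) 0))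
          (a.length + b.length) := by
  have hra : a.reverse.length = a.length := by simp
  have hrb : b.reverse.length = b.length := by simp
  have hbl : 1 ≤ b.reverse.length := by
    rw [hrb]; exact Nat.one_le_iff_ne_zero.mpr (by simpa using hbb)
  have hal : 1 ≤ a.length := Nat.one_le_iff_ne_zero.mpr (by simpa using ha)
  obtain ⟨L, V, G, _⟩ :=
    pvOuter_inv base hb a.reverse b.reverse hbl (a.length + b.length) (by omega)
      a.reverse.length le_rfl
  rw [hra] at L V G
  set R := (List.range a.length).foldl (pvOStep base a.reverse b.reverse)
    (List.replicate (a.length + b.length) 0) with hR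
  have hstep : mul_in_base a b base = R := by
    unfold mul_in_base
    rw [pvPad_nil]
  rw [hstep]
  have hVfull : pvValLE base R = pvValLE base a.reverse * pvValLE base b.reverse := by
    rw [V, List.take_of_length_le (by omega)]
  have hRne : R ≠ [] := by
    intro h
    rw [h] at L
    simp at L
    omega
  have := pvCanon_unique hb R hRne (by
    intro i hilt
    rw [L] at hilt
    exact G i (by omega) (by omega))
  rw [L, hVfull] at this
  rw [pvHorner_eq, pvHorner_eq]
  exact this

-- ===== VERDICT (by name: the statement is the Claim_ definition above) =====
theorem mul_in_base_spec : Claim_equal_mul_in_base := by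
  intro a b base _dom pre
  unfold Spec_mul_in_base
  by_cases ha : a = []
  · by_cases hb : b = []
    · subst ha; subst hb
      simp [mul_in_base, mul_in_base_alt, pvPad_nil]
    · have hbase : base ≠ 0 := by
        rcases pre with h | ⟨_, h⟩
        · exact h
        · exact absurd h hb
      subst ha
      rw [pvAlt_eq_canon]
      simp only [List.foldl_nil, zero_mul]
      rw [pvCanon_zero hbase]
      unfold mul_in_base
      simp [pvPad_nil]
  · have hbase : base ≠ 0 := by
      rcases pre with h | ⟨h, _⟩
      · exact h
      · exact absurd h ha
    by_cases hb : b = []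
    · subst hb
      rw [pvAlt_eq_canon]
      simp only [List.foldl_nil, mul_zero]
      rw [pvCanon_zero hbase]
      unfold mul_in_base
      rw [pvPad_nil]
      have : ∀ k, (List.range k).foldl (pvOStep base a.reverse ([] : List Int).reverse)
          (List.replicate (a.length + ([] : List Int).length) 0)
          = List.replicate (a.length + ([] : List Int).length) 0 := by
        intro k
        induction k with
        | zero => rfl
        | succ k ih =>
          rw [List.range_succ, List.foldl_append, ih, List.foldl_cons, List.foldl_nil]
          simp [pvOStep]
      rw [this]
    · rw [pvA_main a b base hbase ha hb, pvAlt_eq_canon]
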